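-- pv_equiv track=rewrite | github.com/Happu2/wingify-HealthCheck-Backend | tools.py | _run
-- ===== SOURCE A (Python) =====
-- def _run(blood_report_data: str) -> str:
--     """Create exercise plan based on blood analysis"""
--     try:
--         recommendations = []
--         data_lower = blood_report_data.lower()
--
--         # Check for conditions that affect exercise
--         if any(term in data_lower for term in ['hemoglobin', 'hgb']) and any(term in data_lower for term in ['low', 'anemia']):
--             recommendations.append("Start with light exercise: walking, gentle yoga. Gradually increase intensity as iron levels improve")
--
--         if 'cholesterol' in data_lower and any(term in data_lower for term in ['high', 'elevated']):
--             recommendations.append("Cardiovascular exercise: 30 minutes moderate activity 5 days/week (walking, swimming, cycling)")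
--
--         if 'glucose' in data_lower and any(term in data_lower for term in ['high', 'diabetes']):
--             recommendations.append("Blood sugar management: regular exercise, resistance training 2-3x/week, post-meal walks")
--
--         # General recommendations
--         recommendations.extend([
--             "Strength training: 2-3 sessions per week targeting major muscle groups",
--             "Flexibility: Daily stretching or yoga",
--             "Cardio: 150 minutes moderate or 75 minutes vigorous activity per week"
--         ])
--
--         return "Exercise Plan:\n" + "\n".join([f"• {rec}" for rec in recommendations])
--
--     except Exception as e:
--         return f"Error in exercise planning: {str(e)}"
-- ===== SOURCE B (Python) =====
-- def _run(blood_report_data: str) -> str: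
--     """Create exercise plan based on blood analysis"""
--     try:
--         text = blood_report_data.lower()
--         # Single scan: at each position record which keywords start there.
--         terms = ('hemoglobin', 'hgb', 'low', 'anemia', 'cholesterol',
--                  'high', 'elevated', 'glucose', 'diabetes')
--         found = set()
--         for i in range(len(text)):
--             for term in terms:
--                 if text.startswith(term, i):
--                     found.add(term)
--         # Build the plan string directly from the presence flags.
--         plan = "Exercise Plan:"
--         if ('hemoglobin' in found or 'hgb' in found) and ('low' in found or 'anemia' in found):
--             plan += "\n• Start with light exercise: walking, gentle yoga. Gradually increase intensity as iron levels improve"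
--         if 'cholesterol' in found and ('high' in found or 'elevated' in found):
--             plan += "\n• Cardiovascular exercise: 30 minutes moderate activity 5 days/week (walking, swimming, cycling)"
--         if 'glucose' in found and ('high' in found or 'diabetes' in found):
--             plan += "\n• Blood sugar management: regular exercise, resistance training 2-3x/week, post-meal walks"
--         plan += ("\n• Strength training: 2-3 sessions per week targeting major muscle groups"
--                  "\n• Flexibility: Daily stretching or yoga"
--                  "\n• Cardio: 150 minutes moderate or 75 minutes vigorous activity per week")
--         return plan
--     except Exception as e:
--         return f"Error in exercise planning: {str(e)}"
-- ===== Notes on version B (the rewrite author's own statement) =====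
-- stated objective: alternative
-- what changed: Instead of re-searching the text with one substring scan per keyword per rule, B makes a single positional scan collecting the set of keywords that occur, then decides the rules from that presence set and builds the plan string by direct concatenation with no intermediate list/join.
import Mathlib
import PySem

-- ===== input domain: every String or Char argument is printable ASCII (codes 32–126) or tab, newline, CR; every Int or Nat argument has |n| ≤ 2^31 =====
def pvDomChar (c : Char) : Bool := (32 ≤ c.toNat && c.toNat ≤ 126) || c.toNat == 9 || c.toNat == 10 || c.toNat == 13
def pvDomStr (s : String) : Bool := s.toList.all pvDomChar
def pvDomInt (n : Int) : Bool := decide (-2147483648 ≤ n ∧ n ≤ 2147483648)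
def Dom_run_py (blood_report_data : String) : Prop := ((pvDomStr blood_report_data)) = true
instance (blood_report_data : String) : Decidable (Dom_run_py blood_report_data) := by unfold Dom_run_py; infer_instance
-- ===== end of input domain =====

-- B replaces A's per-rule substring searches with one positional scan collecting the set of keywords present, then builds the plan string by direct concatenation (alternative decomposition; same O(n) cost).


-- ===== PORT A =====
def msgA1 : String := "Start with light exercise: walking, gentle yoga. Gradually increase intensity as iron levels improve"
def msgA2 : String := "Cardiovascular exercise: 30 minutes moderate activity 5 days/week (walking, swimming, cycling)"
def msgA3 : String := "Blood sugar management: regular exercise, resistance training 2-3x/week, post-meal walks"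
def msgG1 : String := "Strength training: 2-3 sessions per week targeting major muscle groups"
def msgG2 : String := "Flexibility: Daily stretching or yoga"
def msgG3 : String := "Cardio: 150 minutes moderate or 75 minutes vigorous activity per week"

-- literal transliteration of A: lowercase once, three sequential if-appends, extend, bullet-map, join
def run_py (blood_report_data : String) : String :=
  let data_lower := PySem.Str.lower blood_report_data
  let recommendations : List String := []
  let recommendations :=
    if (["hemoglobin", "hgb"].any (fun t => PySem.Str.isIn t data_lower)) &&
       (["low", "anemia"].any (fun t => PySem.Str.isIn t data_lower)) then
      recommendations ++ [msgA1]
    else recommendations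
  let recommendations :=
    if PySem.Str.isIn "cholesterol" data_lower &&
       (["high", "elevated"].any (fun t => PySem.Str.isIn t data_lower)) then
      recommendations ++ [msgA2]
    else recommendations
  let recommendations :=
    if PySem.Str.isIn "glucose" data_lower &&
       (["high", "diabetes"].any (fun t => PySem.Str.isIn t data_lower)) then
      recommendations ++ [msgA3]
    else recommendations
  let recommendations := recommendations ++ [msgG1, msgG2, msgG3]
  "Exercise Plan:\n" ++ PySem.Str.join "\n" (recommendations.map (fun rec => "• " ++ rec))

-- ===== PORT B =====
def pvTerms : List (List Char) :=
  ["hemoglobin".toList, "hgb".toList, "low".toList, "anemia".toList, "cholesterol".toList,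
   "high".toList, "elevated".toList, "glucose".toList, "diabetes".toList]

-- transliteration of B: one scan over the positions of the lowered text collecting the set of
-- keywords found (text.startswith(term, i) with 0 ≤ i is exactly 'startswith' on 'text.drop i'),
-- then direct string concatenation driven by presence tests on that set.
def run_py_alt (blood_report_data : String) : String :=
  let text := PySem.Chars.lower blood_report_data.toList
  let found : PySem.Set (List Char) :=
    (List.range text.length).foldl (fun acc i =>
      pvTerms.foldl (fun acc term =>
        if PySem.Chars.startswith (text.drop i) term then PySem.Set.add acc term else acc) acc)
      PySem.Set.empty
  let plan := "Exercise Plan:".toList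
  let plan :=
    if (found.contains "hemoglobin".toList || found.contains "hgb".toList) &&
       (found.contains "low".toList || found.contains "anemia".toList) then
      plan ++ ("\n• ".toList ++ msgA1.toList)
    else plan
  let plan :=
    if found.contains "cholesterol".toList &&
       (found.contains "high".toList || found.contains "elevated".toList) then
      plan ++ ("\n• ".toList ++ msgA2.toList)
    else plan
  let plan :=
    if found.contains "glucose".toList &&
       (found.contains "high".toList || found.contains "diabetes".toList) then
      plan ++ ("\n• ".toList ++ msgA3.toList)
    else plan
  let plan := plan ++ ("\n• ".toList ++ msgG1.toList)
                   ++ ("\n• ".toList ++ msgG2.toList)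
                   ++ ("\n• ".toList ++ msgG3.toList)
  String.ofList plan

-- ===== PRECONDITION & SPEC =====
def Spec_run_py (blood_report_data : String) (out : String) : Prop := out = run_py_alt blood_report_data
instance (blood_report_data : String) (out : String) : Decidable (Spec_run_py blood_report_data out) := by unfold Spec_run_py; infer_instance

-- ===== CLAIM (what is proved, stated in full; the proofs are below) =====
def Claim_equal_run_py : Prop := ∀ (blood_report_data : String), Dom_run_py blood_report_data → Spec_run_py blood_report_data (run_py blood_report_data)

-- ===== LEMMAS AND PROOFS =====

-- the inner loop over the term table adds exactly the terms that start at this position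
lemma pv_mem_inner (ts : List (List Char)) (d : List Char) (acc : PySem.Set (List Char)) (t : List Char) :
    (t ∈ ts.foldl (fun acc term =>
        if PySem.Chars.startswith d term then PySem.Set.add acc term else acc) acc) ↔
      t ∈ acc ∨ (t ∈ ts ∧ PySem.Chars.startswith d t = true) := by
  induction ts generalizing acc with
  | nil => simp
  | cons u us ih =>
    simp only [List.foldl_cons]
    by_cases h : PySem.Chars.startswith d u = true
    · simp only [h, if_true, ih, PySem.Set.mem_add, List.mem_cons]
      constructor
      · rintro ((ha | rfl) | hb)
        · exact Or.inl ha
        · exact Or.inr ⟨Or.inl rfl, h⟩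
        · exact Or.inr ⟨Or.inr hb.1, hb.2⟩
      · rintro (ha | ⟨(rfl | hm), hs⟩)
        · exact Or.inl (Or.inl ha)
        · exact Or.inl (Or.inr rfl)
        · exact Or.inr ⟨hm, hs⟩
    · simp only [h, ih, List.mem_cons]
      constructor
      · rintro (ha | hb)
        · exact Or.inl ha
        · exact Or.inr ⟨Or.inr hb.1, hb.2⟩
      · rintro (ha | ⟨(rfl | hm), hs⟩)
        · exact Or.inl ha
        · exact absurd hs h
        · exact Or.inr ⟨hm, hs⟩

-- the outer loop over positions collects exactly the terms starting somewhere in the range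
lemma pv_mem_outer (is : List Nat) (text : List Char) (acc : PySem.Set (List Char)) (t : List Char) :
    (t ∈ is.foldl (fun acc i =>
        pvTerms.foldl (fun acc term =>
          if PySem.Chars.startswith (text.drop i) term then PySem.Set.add acc term else acc) acc) acc) ↔
      t ∈ acc ∨ (t ∈ pvTerms ∧ ∃ i ∈ is, PySem.Chars.startswith (text.drop i) t = true) := by
  induction is generalizing acc with
  | nil => simp
  | cons j js ih =>
    simp only [List.foldl_cons, ih, pv_mem_inner, List.mem_cons]
    constructor
    · rintro ((ha | ⟨hm, hs⟩) | ⟨hm, i, hi, hs⟩)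
      · exact Or.inl ha
      · exact Or.inr ⟨hm, j, Or.inl rfl, hs⟩
      · exact Or.inr ⟨hm, i, Or.inr hi, hs⟩
    · rintro (ha | ⟨hm, i, (rfl | hi), hs⟩)
      · exact Or.inl (Or.inl ha)
      · exact Or.inl (Or.inr ⟨hm, hs⟩)
      · exact Or.inr ⟨hm, i, hi, hs⟩

-- presence in the scanned set = Python's substring test, for the nonempty table terms
lemma pv_found_iff (text t : List Char) (hm : t ∈ pvTerms) (hne : t ≠ []) :
    ((List.range text.length).foldl (fun acc i =>
        pvTerms.foldl (fun acc term =>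
          if PySem.Chars.startswith (text.drop i) term then PySem.Set.add acc term else acc) acc)
      PySem.Set.empty).contains t = PySem.Chars.isIn t text := by
  have hmem : (t ∈ (List.range text.length).foldl (fun acc i =>
      pvTerms.foldl (fun acc term =>
        if PySem.Chars.startswith (text.drop i) term then PySem.Set.add acc term else acc) acc)
      PySem.Set.empty) ↔ PySem.Chars.isIn t text = true := by
    rw [pv_mem_outer]
    simp only [PySem.Set.empty, List.not_mem_nil, false_or, List.mem_range]
    rw [← PySem.Chars.exists_prefix_drop_iff_isIn]
    constructor
    · rintro ⟨_, i, _, hs⟩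
      exact ⟨i, (PySem.Chars.startswith_iff _ _).mp hs⟩
    · rintro ⟨j, hj⟩
      refine ⟨hm, j, ?_, (PySem.Chars.startswith_iff _ _).mpr hj⟩
      by_contra hge
      rw [not_lt] at hge
      have : text.drop j = [] := List.drop_eq_nil_of_le hge
      rw [this] at hj
      exact hne (List.prefix_nil.mp hj)
  cases hc : PySem.Chars.isIn t text
  · simp only [PySem.Set.contains]
    rw [List.contains_eq_mem]
    simp only [decide_eq_false_iff_not]
    intro h
    exact absurd (hmem.mp h) (by simp [hc])
  · simp only [PySem.Set.contains]
    rw [List.contains_eq_mem]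
    simp only [decide_eq_true_eq]
    exact hmem.mpr hc

-- splicing "\n• " between items = prefixing each item with "\n" and bulleting it (list level)
lemma pv_join_flatten (nl b nlb : List Char) (h : nlb = nl ++ b) (r : String) (rest : List String) :
    nl ++ PySem.Chars.join nl ((r :: rest).map (fun x => b ++ x.toList)) =
      ((r :: rest).map (fun x => nlb ++ x.toList)).flatten := by
  subst h
  induction rest generalizing r with
  | nil => simp [PySem.Chars.join_singleton, List.append_assoc]
  | cons y ys ih =>
    simp only [List.map_cons] at *
    rw [PySem.Chars.join_cons_cons, List.flatten_cons, ← ih y]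
    simp [List.append_assoc]

-- A's "header + join of bulleted list" = B's direct concatenation, for any nonempty list
lemma pv_build (r : String) (rest : List String) :
    "Exercise Plan:\n" ++ PySem.Str.join "\n" ((r :: rest).map (fun rec => "• " ++ rec)) =
      String.ofList ("Exercise Plan:".toList ++
        (((r :: rest).map (fun x => "\n• ".toList ++ x.toList)).flatten)) := by
  apply String.toList_inj.mp
  simp only [String.toList_append, PySem.Str.toList_join, String.toList_ofList, List.map_map,
    Function.comp_def]
  rw [show ("Exercise Plan:\n".toList : List Char) = "Exercise Plan:".toList ++ "\n".toList from by decide,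
    List.append_assoc]
  exact congrArg _ (pv_join_flatten "\n".toList "• ".toList "\n• ".toList (by decide) r rest)

-- ===== VERDICT (by name: the statement is the Claim_ definition above) =====
set_option maxHeartbeats 1000000 in
theorem run_py_spec : Claim_equal_run_py := by
  intro s _
  unfold Spec_run_py
  simp only [run_py, run_py_alt]
  rw [pv_found_iff _ _ (by simp [pvTerms]) (by decide),
      pv_found_iff _ _ (by simp [pvTerms]) (by decide),
      pv_found_iff _ _ (by simp [pvTerms]) (by decide),
      pv_found_iff _ _ (by simp [pvTerms]) (by decide),
      pv_found_iff _ _ (by simp [pvTerms]) (by decide),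
      pv_found_iff _ _ (by simp [pvTerms]) (by decide),
      pv_found_iff _ _ (by simp [pvTerms]) (by decide),
      pv_found_iff _ _ (by simp [pvTerms]) (by decide),
      pv_found_iff _ _ (by simp [pvTerms]) (by decide)]
  simp only [PySem.Str.isIn_eq, PySem.Str.toList_lower, List.any_cons, List.any_nil,
    Bool.or_false]
  split_ifs <;>
  · simp only [List.nil_append, List.cons_append, List.append_assoc]
    rw [pv_build]
    refine congrArg String.ofList ?_
    simp only [List.map_cons, List.map_nil, List.flatten_cons, List.flatten_nil,
      List.append_nil, List.append_assoc]
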